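-- pv_equiv track=rewrite | github.com/AdminRHS/Employee_Profile_Sync | sync_employee_profiles.py | match_employee
-- ===== SOURCE A (Python) =====
-- from typing import Dict, List, Optional, Tuple
--
-- def match_employee(name: str, employees: Dict) -> Optional[Dict]:
--     """Match profile name to employee data"""
--     # Direct match
--     if name in employees:
--         return employees[name]
--
--     # Case-insensitive match
--     name_lower = name.lower()
--     for emp_name, emp_data in employees.items():
--         if emp_name.lower() == name_lower:
--             return emp_data
--
--     # Last name + first name match
--     name_parts = name.split()
--     for emp_name in employees.keys():
--         emp_parts = emp_name.split()
--         if len(name_parts) >= 2 and len(emp_parts) >= 2: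
--             if name_parts[-1].lower() == emp_parts[-1].lower():
--                 if name_parts[0].lower() == emp_parts[0].lower():
--                     return employees[emp_name]
--
--     return None
-- ===== SOURCE B (Python) =====
-- def match_employee(name, employees):
--     """Match profile name to employee data: single pass, best-tier accumulator."""
--     name_lower = name.lower()
--     nps = name.split()
--     want = (nps[0].lower(), nps[-1].lower()) if len(nps) >= 2 else None
--     best = None  # (tier, data): 2 = case-insensitive, 3 = first+last match; keep first per tier
--     for emp_name, emp_data in employees.items():
--         if emp_name == name:
--             return emp_data
--         if (best is None or best[0] > 2) and emp_name.lower() == name_lower: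
--             best = (2, emp_data)
--         elif best is None and want is not None:
--             eps = emp_name.split()
--             if len(eps) >= 2 and (eps[0].lower(), eps[-1].lower()) == want:
--                 best = (3, emp_data)
--     return best[1] if best is not None else None
-- ===== Notes on version B (the rewrite author's own statement) =====
-- stated objective: alternative
-- what changed: A makes up to three staged scans over the dict (exact, then case-insensitive, then first+last parts); B makes a single pass with a best-tier accumulator that returns immediately on an exact hit and keeps the first occurrence of the best fallback tier seen.
import Mathlib
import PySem

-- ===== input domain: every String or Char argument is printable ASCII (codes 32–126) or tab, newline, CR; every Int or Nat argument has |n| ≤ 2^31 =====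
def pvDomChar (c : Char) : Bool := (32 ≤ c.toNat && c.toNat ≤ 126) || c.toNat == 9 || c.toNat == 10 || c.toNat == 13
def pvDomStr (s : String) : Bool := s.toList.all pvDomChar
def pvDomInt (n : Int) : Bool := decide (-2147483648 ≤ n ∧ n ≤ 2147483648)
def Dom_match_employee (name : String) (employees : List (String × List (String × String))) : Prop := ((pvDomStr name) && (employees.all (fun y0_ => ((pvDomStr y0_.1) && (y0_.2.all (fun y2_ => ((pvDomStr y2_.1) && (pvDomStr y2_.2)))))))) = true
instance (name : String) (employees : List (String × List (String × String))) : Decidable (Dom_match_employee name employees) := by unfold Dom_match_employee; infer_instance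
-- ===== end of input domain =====

-- B replaces A's three staged scans by ONE pass with a best-tier accumulator
-- (return at once on an exact hit; keep the first case-insensitive match, else the
-- first first+last-parts match). Alternative decomposition; no speed claim.

-- ===== PORT A =====
-- A's third pass indexes ps[0]/ps[-1] only after the `len >= 2` tests succeed, so they are
-- ported as headD "" / getLastD "" (exact under that guard).
def match_employee (name : String) (employees : List (String × List (String × String))) : Option (List (String × String)) :=
  -- Direct match
  if (PySem.Dict.mk employees).contains name then (PySem.Dict.mk employees).get? name
  else
    -- Case-insensitive match: first item whose lowered key equals name.lower()
    let nameLower := PySem.Str.lower name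
    match employees.find? (fun p => PySem.Str.lower p.1 == nameLower) with
    | some p => some p.2
    | none =>
      -- Last name + first name match: first key passing the guarded comparisons
      let nameParts := PySem.Str.split₀ name
      match employees.find? (fun p =>
          let empParts := PySem.Str.split₀ p.1;
          decide (2 ≤ nameParts.length) && decide (2 ≤ empParts.length) &&
          (PySem.Str.lower (nameParts.getLastD "") == PySem.Str.lower (empParts.getLastD "")) &&
          (PySem.Str.lower (nameParts.headD "") == PySem.Str.lower (empParts.headD ""))) with
      | some p => (PySem.Dict.mk employees).get? p.1
      | none => none

-- ===== PORT B =====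
-- Source B's single loop: state `best : Option (tier, data)`, early return on exact match
def pvScan (name nameLower : String) (want : Option (String × String))
    (best : Option (Nat × List (String × String))) :
    List (String × List (String × String)) → Option (List (String × String))
  | [] => best.map (·.2)
  | p :: rest =>
    if p.1 == name then some p.2
    else if (match best with | none => true | some b => decide (2 < b.1)) &&
            (PySem.Str.lower p.1 == nameLower) then
      pvScan name nameLower want (some (2, p.2)) rest
    else if best.isNone then
      match want with
      | some wk =>
        let eps := PySem.Str.split₀ p.1
        if decide (2 ≤ eps.length) &&
            ((PySem.Str.lower (eps.headD ""), PySem.Str.lower (eps.getLastD "")) == wk) then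
          pvScan name nameLower want (some (3, p.2)) rest
        else pvScan name nameLower want best rest
      | none => pvScan name nameLower want best rest
    else pvScan name nameLower want best rest

def match_employee_alt (name : String) (employees : List (String × List (String × String))) : Option (List (String × String)) :=
  let nameLower := PySem.Str.lower name
  let nps := PySem.Str.split₀ name
  let want := if 2 ≤ nps.length then
      some (PySem.Str.lower (nps.headD ""), PySem.Str.lower (nps.getLastD "")) else none
  pvScan name nameLower want none employees

-- ===== PRECONDITION & SPEC =====
-- Pre_ excludes association lists with duplicate keys: a Python dict cannot hold them (a
-- duplicate-key literal collapses to the last value), so the list-level first-vs-last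
-- choice is an artifact of the model, not of either program.
def Pre_match_employee (name : String) (employees : List (String × List (String × String))) : Prop :=
  (employees.map (·.1)).Nodup
instance (name : String) (employees : List (String × List (String × String))) : Decidable (Pre_match_employee name employees) := by unfold Pre_match_employee; infer_instance

def pvWitness_match_employee : String × (List (String × List (String × String))) :=
  ("Al Bo", [("al bo", [("id", "1")]), ("Cy", [("id", "2")])])

def Spec_match_employee (name : String) (employees : List (String × List (String × String))) (out : Option (List (String × String))) : Prop := out = match_employee_alt name employees
instance (name : String) (employees : List (String × List (String × String))) (out : Option (List (String × String))) : Decidable (Spec_match_employee name employees out) := by unfold Spec_match_employee; infer_instance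

-- ===== CLAIM =====
def Claim_equal_match_employee : Prop := ∀ (name : String) (employees : List (String × List (String × String))), Dom_match_employee name employees → Pre_match_employee name employees → Spec_match_employee name employees (match_employee name employees)

-- ===== LEMMAS AND PROOFS =====

-- the tier-3 predicate of the scan, as a single Bool function of the entry
def pvP3 (want : Option (String × String)) (p : String × List (String × String)) : Bool :=
  match want with
  | none => false
  | some wk =>
    decide (2 ≤ (PySem.Str.split₀ p.1).length) &&
      ((PySem.Str.lower ((PySem.Str.split₀ p.1).headD ""),
        PySem.Str.lower ((PySem.Str.split₀ p.1).getLastD "")) == wk)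

-- what the single pass computes, as the three staged searches
def pvChain (name nameLower : String) (want : Option (String × String))
    (best : Option (Nat × List (String × String)))
    (l : List (String × List (String × String))) : Option (List (String × String)) :=
  match l.find? (fun p => p.1 == name) with
  | some p => some p.2
  | none =>
    match best with
    | some b =>
      if b.1 ≤ 2 then some b.2
      else
        match l.find? (fun p => PySem.Str.lower p.1 == nameLower) with
        | some p => some p.2
        | none => some b.2
    | none =>
      match l.find? (fun p => PySem.Str.lower p.1 == nameLower) with
      | some p => some p.2
      | none => (l.find? (pvP3 want)).map (·.2)

theorem pvScan_eq (name nameLower : String) (want : Option (String × String))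
    (l : List (String × List (String × String))) (best : Option (Nat × List (String × String))) :
    pvScan name nameLower want best l = pvChain name nameLower want best l := by
  induction l generalizing best with
  | nil => cases best with
    | none => rfl
    | some b => by_cases h : b.1 ≤ 2 <;> simp [pvScan, pvChain, h]
  | cons p rest ih =>
    by_cases h1 : (p.1 == name) = true
    · simp [pvScan, pvChain, h1]
    · by_cases h2 : (PySem.Str.lower p.1 == nameLower) = true
      · cases best with
        | none =>
          simp only [pvScan, h1, h2, ih]
          simp [pvChain, h1, h2]
        | some b =>
          by_cases hb : b.1 ≤ 2
          · have : ¬ (2 < b.1) := by omega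
            simp only [pvScan, h1, h2, this, ih]
            simp [pvChain, h1, h2, hb]
          · have : 2 < b.1 := by omega
            simp only [pvScan, h1, h2, this, ih]
            simp [pvChain, h1, h2, hb]
      · cases best with
        | none =>
          cases hw : want with
          | none =>
            subst hw
            have e1 : pvScan name nameLower none none (p :: rest)
                = pvScan name nameLower none none rest := by
              simp [pvScan, h1, h2]
            rw [e1, ih]
            cases hA : rest.find? (fun q => q.1 == name) <;>
              cases hB : rest.find? (fun q => PySem.Str.lower q.1 == nameLower) <;>
              simp [pvChain, h1, h2, pvP3, hA, hB]
          | some wk =>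
            subst hw
            have e1 : pvScan name nameLower (some wk) none (p :: rest)
                = if pvP3 (some wk) p then pvScan name nameLower (some wk) (some (3, p.2)) rest
                  else pvScan name nameLower (some wk) none rest := by
              simp only [pvScan, h1, h2]; rfl
            rw [e1]
            by_cases h3 : pvP3 (some wk) p = true
            · rw [if_pos h3, ih]
              cases hA : rest.find? (fun q => q.1 == name) <;>
                cases hB : rest.find? (fun q => PySem.Str.lower q.1 == nameLower) <;>
                simp [pvChain, h1, h2, h3, hA, hB]
            · rw [if_neg h3, ih]
              cases hA : rest.find? (fun q => q.1 == name) <;>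
                cases hB : rest.find? (fun q => PySem.Str.lower q.1 == nameLower) <;>
                simp [pvChain, h1, h2, h3, hA, hB]
        | some b =>
          by_cases hb : b.1 ≤ 2
          · have : ¬ (2 < b.1) := by omega
            simp only [pvScan, h1, h2, this, ih]
            simp [pvChain, h1, h2, hb]
          · have : 2 < b.1 := by omega
            simp only [pvScan, h1, h2, this, ih]
            simp [pvChain, h1, h2, hb]

-- Dict.mk lookups on a literal list are first-match searches
theorem pv_get_mk (l : List (String × List (String × String))) (k : String) :
    (PySem.Dict.mk l).get? k = (l.find? (fun p => p.1 == k)).map (·.2) := by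
  induction l with
  | nil => rfl
  | cons p rest ih =>
    rw [show (p :: rest) = ((p.1, p.2) :: rest) from rfl, PySem.Dict.get?_mk_cons]
    by_cases h : (p.1 == k) = true
    · simp [h]
    · simp [h, ih]

-- the two tier-3 predicates agree (A's guarded form vs B's want-keyed form)
theorem pv_pred_eq (name : String) (p : String × List (String × String)) :
    (let empParts := PySem.Str.split₀ p.1;
      decide (2 ≤ (PySem.Str.split₀ name).length) && decide (2 ≤ empParts.length) &&
      (PySem.Str.lower ((PySem.Str.split₀ name).getLastD "") == PySem.Str.lower (empParts.getLastD "")) &&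
      (PySem.Str.lower ((PySem.Str.split₀ name).headD "") == PySem.Str.lower (empParts.headD "")))
    = pvP3 (if 2 ≤ (PySem.Str.split₀ name).length then
        some (PySem.Str.lower ((PySem.Str.split₀ name).headD ""),
              PySem.Str.lower ((PySem.Str.split₀ name).getLastD "")) else none) p := by
  by_cases hn : 2 ≤ (PySem.Str.split₀ name).length
  · rw [if_pos hn]
    rw [Bool.eq_iff_iff]
    simp only [pvP3, Bool.and_eq_true, beq_iff_eq, decide_eq_true_eq, Prod.mk.injEq]
    constructor
    · rintro ⟨⟨⟨-, h2⟩, h3⟩, h4⟩; exact ⟨h2, h4.symm, h3.symm⟩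
    · rintro ⟨h2, h4, h3⟩; exact ⟨⟨⟨hn, h2⟩, h3.symm⟩, h4.symm⟩
  · rw [if_neg hn]
    simp [pvP3, hn]

-- ===== VERDICT (by name: the statement is the Claim_ definition above) =====
theorem match_employee_spec : Claim_equal_match_employee := by
  intro name emps _ hpre
  unfold Spec_match_employee match_employee match_employee_alt
  rw [pvScan_eq]
  have hcont : (PySem.Dict.mk emps).contains name
      = ((emps.find? (fun p => p.1 == name)).map (·.2)).isSome := by
    rw [PySem.Dict.contains_eq_isSome_get?, pv_get_mk]
  cases hf1 : emps.find? (fun p => p.1 == name) with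
  | some p =>
    simp only [pvChain, hf1, hcont, Option.map_some, Option.isSome_some, if_pos]
    rw [pv_get_mk, hf1]; rfl
  | none =>
    simp only [pvChain, hf1, hcont]
    cases hf2 : emps.find? (fun p => PySem.Str.lower p.1 == PySem.Str.lower name) with
    | some p => simp
    | none =>
      simp only [Option.map_none]
      have hpred : (fun p : String × List (String × String) =>
          let empParts := PySem.Str.split₀ p.1;
          decide (2 ≤ (PySem.Str.split₀ name).length) && decide (2 ≤ empParts.length) &&
          (PySem.Str.lower ((PySem.Str.split₀ name).getLastD "") == PySem.Str.lower (empParts.getLastD "")) &&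
          (PySem.Str.lower ((PySem.Str.split₀ name).headD "") == PySem.Str.lower (empParts.headD "")))
        = pvP3 (if 2 ≤ (PySem.Str.split₀ name).length then
            some (PySem.Str.lower ((PySem.Str.split₀ name).headD ""),
                  PySem.Str.lower ((PySem.Str.split₀ name).getLastD "")) else none) := by
        funext p; exact pv_pred_eq name p
      rw [hpred]
      cases hf3 : emps.find? (pvP3 (if 2 ≤ (PySem.Str.split₀ name).length then
          some (PySem.Str.lower ((PySem.Str.split₀ name).headD ""),
                PySem.Str.lower ((PySem.Str.split₀ name).getLastD "")) else none)) with
      | some p =>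
        have hmem : p ∈ emps := List.mem_of_find?_eq_some hf3
        -- under Pre_ (distinct keys), the first entry with key p.1 is p itself
        have : emps.find? (fun q => q.1 == p.1) = some p := by
          have hval : ∀ q ∈ emps, (fun q => q.1 == p.1) q = true → q = p := by
            intro q hq hqk
            have h1 : q.1 = p.1 := by simpa using hqk
            have := List.inj_on_of_nodup_map hpre
            exact this hq hmem h1
          cases hfind : emps.find? (fun q => q.1 == p.1) with
          | none =>
            have := List.find?_eq_none.mp hfind p hmem
            simp at this
          | some q =>
            have hq := List.find?_eq_some_iff_append.mp hfind
            have hk : (fun q => q.1 == p.1) q = true := hq.1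
            have hqm : q ∈ emps := List.mem_of_find?_eq_some hfind
            rw [hval q hqm hk]
        simp [pv_get_mk, this]
      | none => simp
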